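-- pv_equiv track=rewrite | github.com/0spinboson/verenigingen | cleanup_temp/utils_one_offs/eboekhouden_category_mapping_fixed.py | group_accounts_by_type
-- ===== SOURCE A (Python) =====
-- from collections import defaultdict
--
-- def group_accounts_by_type(accounts):
--     """Group accounts without categories by detected type"""
--     groups = defaultdict(list)
--
--     for account in accounts:
--         desc_lower = account.get("description", "").lower()
--         code = account.get("code", "")
--
--         # Detect liability reserves first (employee-related reserves)
--         if any(term in desc_lower for term in ["reservering vakantiegeld", "reservering sociale lasten"]):
--             groups["Current Liability"].append(account)
--         # Detect equity accounts (excluding employee reserves)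
--         elif any(term in desc_lower for term in ["eigen vermogen", "kapitaal", "bestemmingsreserve", "resultaat"]) or (
--             "reserve" in desc_lower and not any(emp in desc_lower for emp in ["vakantiegeld", "sociale lasten"])
--         ):
--             groups["Equity"].append(account)
--         # Income accounts
--         elif any(term in desc_lower for term in ["omzet", "opbrengst", "inkomsten", "contributie", "donatie"]) or code.startswith("8"):
--             groups["Income Account"].append(account)
--         # Expense accounts
--         elif any(term in desc_lower for term in ["kosten", "uitgaven", "inkoop", "afschrijving"]) or code.startswith("4"):
--             groups["Expense Account"].append(account)
--         # Tax accounts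
--         elif "btw" in desc_lower:
--             groups["Tax"].append(account)
--         # Fixed assets
--         elif any(term in desc_lower for term in ["vaste activa", "inventaris", "gebouw", "machine"]) or code.startswith("0"):
--             groups["Fixed Asset"].append(account)
--         # Current assets (but exclude "vooruitontvangen" which is a liability)
--         elif ("vooruitontvangen" not in desc_lower and
--               (any(term in desc_lower for term in ["voorraad", "vorderingen", "te ontvangen"]) or code.startswith("1"))):
--             groups["Current Asset"].append(account)
--         # Liabilities (including prepaid amounts and employee reserves)
--         elif any(term in desc_lower for term in ["schuld", "te betalen", "lening", "vooruitontvangen", "reservering"]) or code.startswith("2"):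
--             groups["Current Liability"].append(account)
--         else:
--             # Default based on account code
--             if code:
--                 first_digit = code[0]
--                 if first_digit in ["0", "1"]:
--                     groups["Current Asset"].append(account)
--                 elif first_digit == "2":
--                     groups["Current Liability"].append(account)
--                 elif first_digit in ["4", "5", "6", "7"]:
--                     groups["Expense Account"].append(account)
--                 elif first_digit == "8":
--                     groups["Income Account"].append(account)
--                 else:
--                     groups["Unknown"].append(account)
--
--     return groups
-- ===== SOURCE B (Python) =====
-- from collections import defaultdict
--
-- LABELS = ["Current Liability", "Equity", "Income Account", "Expense Account",
--           "Tax", "Fixed Asset", "Current Asset", "Current Liability"]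
--
-- KEYWORDS = {
--     "reservering vakantiegeld": 0, "reservering sociale lasten": 0,
--     "eigen vermogen": 1, "kapitaal": 1, "bestemmingsreserve": 1, "resultaat": 1,
--     "omzet": 2, "opbrengst": 2, "inkomsten": 2, "contributie": 2, "donatie": 2,
--     "kosten": 3, "uitgaven": 3, "inkoop": 3, "afschrijving": 3,
--     "btw": 4,
--     "vaste activa": 5, "inventaris": 5, "gebouw": 5, "machine": 5,
--     "voorraad": 6, "vorderingen": 6, "te ontvangen": 6,
--     "schuld": 7, "te betalen": 7, "lening": 7, "vooruitontvangen": 7, "reservering": 7,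
-- }
-- PREFIX = {"8": 2, "4": 3, "0": 5, "1": 6, "2": 7}
-- DEFAULT = {"0": "Current Asset", "1": "Current Asset", "2": "Current Liability",
--            "4": "Expense Account", "5": "Expense Account", "6": "Expense Account",
--            "7": "Expense Account", "8": "Income Account"}
--
-- def group_accounts_by_type(accounts):
--     """Group accounts without categories by detected type"""
--     groups = defaultdict(list)
--     for account in accounts:
--         d = account.get("description", "").lower()
--         c = account.get("code", "")
--         # collect the priorities of ALL rules that fire, then take the smallest
--         hits = {p for term, p in KEYWORDS.items() if term in d}
--         if c and c[0] in PREFIX: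
--             hits.add(PREFIX[c[0]])
--         if "reserve" in d and "vakantiegeld" not in d and "sociale lasten" not in d:
--             hits.add(1)
--         if "vooruitontvangen" in d:
--             hits.discard(6)
--         if hits:
--             groups[LABELS[min(hits)]].append(account)
--         elif c:
--             groups[DEFAULT.get(c[0], "Unknown")].append(account)
--     return groups
-- ===== Notes on version B (the rewrite author's own statement) =====
-- stated objective: alternative
-- what changed: Instead of A's first-match if/elif ladder, B collects the priorities of ALL matching rules into a set (one keyword-table scan plus a code-prefix lookup, with the two negation rules as set add/discard) and classifies by the MINIMUM matched priority, falling back to the code-digit default table when the set is empty.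
import Mathlib
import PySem

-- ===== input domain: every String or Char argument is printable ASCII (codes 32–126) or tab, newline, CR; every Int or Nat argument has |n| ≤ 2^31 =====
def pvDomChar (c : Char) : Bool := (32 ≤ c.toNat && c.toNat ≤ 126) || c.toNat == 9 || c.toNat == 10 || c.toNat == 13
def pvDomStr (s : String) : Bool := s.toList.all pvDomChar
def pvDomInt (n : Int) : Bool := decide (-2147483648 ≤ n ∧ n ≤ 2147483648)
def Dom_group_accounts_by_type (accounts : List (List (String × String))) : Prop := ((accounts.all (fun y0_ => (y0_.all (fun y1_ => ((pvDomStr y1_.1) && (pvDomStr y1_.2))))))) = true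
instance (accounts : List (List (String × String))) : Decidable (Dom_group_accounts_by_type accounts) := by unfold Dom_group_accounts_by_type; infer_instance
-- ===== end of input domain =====

-- B replaces A's first-match if/elif ladder by a different strategy: collect the priorities of ALL
-- matching rules into a set (keyword-table scan + code-prefix lookup) and classify by the MINIMUM
-- priority; equal because min of the matched priorities is exactly the first branch that fires.

-- ===== PORT A =====
def group_accounts_by_type (accounts : List (List (String × String))) : List (String × List (List (String × String))) :=
  (accounts.foldl (fun groups account =>
    let desc_lower := PySem.Str.lower ((PySem.Dict.mk account).getD "description" "")
    let code := (PySem.Dict.mk account).getD "code" ""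
    if ["reservering vakantiegeld", "reservering sociale lasten"].any (fun t => PySem.Str.isIn t desc_lower) then
      groups.modify "Current Liability" [] (· ++ [account])
    else if ["eigen vermogen", "kapitaal", "bestemmingsreserve", "resultaat"].any (fun t => PySem.Str.isIn t desc_lower)
        || (PySem.Str.isIn "reserve" desc_lower && !(["vakantiegeld", "sociale lasten"].any (fun e => PySem.Str.isIn e desc_lower))) then
      groups.modify "Equity" [] (· ++ [account])
    else if ["omzet", "opbrengst", "inkomsten", "contributie", "donatie"].any (fun t => PySem.Str.isIn t desc_lower) || PySem.Str.startswith code "8" then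
      groups.modify "Income Account" [] (· ++ [account])
    else if ["kosten", "uitgaven", "inkoop", "afschrijving"].any (fun t => PySem.Str.isIn t desc_lower) || PySem.Str.startswith code "4" then
      groups.modify "Expense Account" [] (· ++ [account])
    else if PySem.Str.isIn "btw" desc_lower then
      groups.modify "Tax" [] (· ++ [account])
    else if ["vaste activa", "inventaris", "gebouw", "machine"].any (fun t => PySem.Str.isIn t desc_lower) || PySem.Str.startswith code "0" then
      groups.modify "Fixed Asset" [] (· ++ [account])
    else if !(PySem.Str.isIn "vooruitontvangen" desc_lower) &&
        (["voorraad", "vorderingen", "te ontvangen"].any (fun t => PySem.Str.isIn t desc_lower) || PySem.Str.startswith code "1") then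
      groups.modify "Current Asset" [] (· ++ [account])
    else if ["schuld", "te betalen", "lening", "vooruitontvangen", "reservering"].any (fun t => PySem.Str.isIn t desc_lower) || PySem.Str.startswith code "2" then
      groups.modify "Current Liability" [] (· ++ [account])
    else
      if code = "" then groups
      else
        match PySem.Str.pyGet? code 0 with
        | none => groups  -- unreachable: code is nonempty here (totality guard for code[0])
        | some first_digit =>
          if first_digit = '0' || first_digit = '1' then groups.modify "Current Asset" [] (· ++ [account])
          else if first_digit = '2' then groups.modify "Current Liability" [] (· ++ [account])
          else if first_digit = '4' || first_digit = '5' || first_digit = '6' || first_digit = '7' then groups.modify "Expense Account" [] (· ++ [account])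
          else if first_digit = '8' then groups.modify "Income Account" [] (· ++ [account])
          else groups.modify "Unknown" [] (· ++ [account])
    ) PySem.Dict.empty).items

-- ===== PORT B =====
def pvLabels : List String :=
  ["Current Liability", "Equity", "Income Account", "Expense Account",
   "Tax", "Fixed Asset", "Current Asset", "Current Liability"]

def pvKeywords : PySem.Dict String Int := PySem.Dict.ofList
  [("reservering vakantiegeld", 0), ("reservering sociale lasten", 0),
   ("eigen vermogen", 1), ("kapitaal", 1), ("bestemmingsreserve", 1), ("resultaat", 1),
   ("omzet", 2), ("opbrengst", 2), ("inkomsten", 2), ("contributie", 2), ("donatie", 2),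
   ("kosten", 3), ("uitgaven", 3), ("inkoop", 3), ("afschrijving", 3),
   ("btw", 4),
   ("vaste activa", 5), ("inventaris", 5), ("gebouw", 5), ("machine", 5),
   ("voorraad", 6), ("vorderingen", 6), ("te ontvangen", 6),
   ("schuld", 7), ("te betalen", 7), ("lening", 7), ("vooruitontvangen", 7), ("reservering", 7)]

def pvPrefix : PySem.Dict Char Int := PySem.Dict.ofList
  [('8', 2), ('4', 3), ('0', 5), ('1', 6), ('2', 7)]

def pvDefault : PySem.Dict Char String := PySem.Dict.ofList
  [('0', "Current Asset"), ('1', "Current Asset"), ('2', "Current Liability"),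
   ('4', "Expense Account"), ('5', "Expense Account"), ('6', "Expense Account"),
   ('7', "Expense Account"), ('8', "Income Account")]

def group_accounts_by_type_alt (accounts : List (List (String × String))) : List (String × List (List (String × String))) :=
  (accounts.foldl (fun groups account =>
    let d := PySem.Str.lower ((PySem.Dict.mk account).getD "description" "")
    let c := (PySem.Dict.mk account).getD "code" ""
    let hits0 : PySem.Set Int :=
      PySem.Set.ofList ((pvKeywords.items.filter (fun tp => PySem.Str.isIn tp.1 d)).map (·.2))
    let hits1 : PySem.Set Int :=
      match PySem.Str.pyGet? c 0 with    -- 'if c and c[0] in PREFIX: hits.add(PREFIX[c[0]])'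
      | some ch => if pvPrefix.contains ch then hits0.add (pvPrefix.getD ch 0) else hits0
      | none => hits0
    let hits2 : PySem.Set Int :=
      if PySem.Str.isIn "reserve" d && !PySem.Str.isIn "vakantiegeld" d && !PySem.Str.isIn "sociale lasten" d
      then hits1.add 1 else hits1
    let hits3 : PySem.Set Int :=
      if PySem.Str.isIn "vooruitontvangen" d then hits2.discard 6 else hits2
    match PySem.List.min? hits3 (fun x => x) with   -- 'if hits: groups[LABELS[min(hits)]].append(...)'
    | some m =>
      match PySem.List.pyGet? pvLabels m with
      | some label => groups.modify label [] (· ++ [account])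
      | none => groups  -- unreachable: every priority is a valid index of LABELS
    | none =>
      match PySem.Str.pyGet? c 0 with   -- 'elif c: groups[DEFAULT.get(c[0], "Unknown")].append(...)'
      | some ch => groups.modify (pvDefault.getD ch "Unknown") [] (· ++ [account])
      | none => groups
    ) PySem.Dict.empty).items

-- ===== PRECONDITION & SPEC =====
def Spec_group_accounts_by_type (accounts : List (List (String × String))) (out : List (String × List (List (String × String)))) : Prop := out = group_accounts_by_type_alt accounts
instance (accounts : List (List (String × String))) (out : List (String × List (List (String × String)))) : Decidable (Spec_group_accounts_by_type accounts out) := by unfold Spec_group_accounts_by_type; infer_instance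

-- ===== CLAIM (what is proved, stated in full; the proofs are below) =====
def Claim_equal_group_accounts_by_type : Prop := ∀ (accounts : List (List (String × String))), Dom_group_accounts_by_type accounts → Spec_group_accounts_by_type accounts (group_accounts_by_type accounts)

-- ===== LEMMAS AND PROOFS =====

def pvKWList : List (String × Int) :=
  [("reservering vakantiegeld", 0), ("reservering sociale lasten", 0),
   ("eigen vermogen", 1), ("kapitaal", 1), ("bestemmingsreserve", 1), ("resultaat", 1),
   ("omzet", 2), ("opbrengst", 2), ("inkomsten", 2), ("contributie", 2), ("donatie", 2),
   ("kosten", 3), ("uitgaven", 3), ("inkoop", 3), ("afschrijving", 3),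
   ("btw", 4),
   ("vaste activa", 5), ("inventaris", 5), ("gebouw", 5), ("machine", 5),
   ("voorraad", 6), ("vorderingen", 6), ("te ontvangen", 6),
   ("schuld", 7), ("te betalen", 7), ("lening", 7), ("vooruitontvangen", 7), ("reservering", 7)]

theorem pv_mem_kw (f : String → Bool) (p : Int) :
    p ∈ PySem.Set.ofList ((pvKWList.filter (fun tp => f tp.1)).map (·.2)) ↔
    ((p = 0 ∧ (f "reservering vakantiegeld" || f "reservering sociale lasten") = true) ∨
     (p = 1 ∧ (f "eigen vermogen" || f "kapitaal" || f "bestemmingsreserve" || f "resultaat") = true) ∨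
     (p = 2 ∧ (f "omzet" || f "opbrengst" || f "inkomsten" || f "contributie" || f "donatie") = true) ∨
     (p = 3 ∧ (f "kosten" || f "uitgaven" || f "inkoop" || f "afschrijving") = true) ∨
     (p = 4 ∧ f "btw" = true) ∨
     (p = 5 ∧ (f "vaste activa" || f "inventaris" || f "gebouw" || f "machine") = true) ∨
     (p = 6 ∧ (f "voorraad" || f "vorderingen" || f "te ontvangen") = true) ∨
     (p = 7 ∧ (f "schuld" || f "te betalen" || f "lening" || f "vooruitontvangen" || f "reservering") = true)) := by
  rw [PySem.Set.mem_ofList]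
  simp only [List.mem_map, List.mem_filter, pvKWList, List.mem_cons, List.not_mem_nil, or_false]
  constructor
  · rintro ⟨tp, ⟨hmem, hin⟩, hval⟩
    rcases hmem with h|h|h|h|h|h|h|h|h|h|h|h|h|h|h|h|h|h|h|h|h|h|h|h|h|h|h|h <;>
      subst h <;> simp only at hval hin <;> subst hval <;> simp [hin]
  · rintro (⟨hp,h⟩|⟨hp,h⟩|⟨hp,h⟩|⟨hp,h⟩|⟨hp,h⟩|⟨hp,h⟩|⟨hp,h⟩|⟨hp,h⟩) <;> subst hp <;>
      (try simp only [Bool.or_eq_true] at h) <;>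
      [rcases h with h|h; rcases h with ((h|h)|h)|h; rcases h with (((h|h)|h)|h)|h; rcases h with ((h|h)|h)|h;
       skip; rcases h with ((h|h)|h)|h; rcases h with (h|h)|h; rcases h with (((h|h)|h)|h)|h] <;>
      (first | exact ⟨("reservering vakantiegeld", 0), ⟨by simp, h⟩, rfl⟩ | exact ⟨("reservering sociale lasten", 0), ⟨by simp, h⟩, rfl⟩ | exact ⟨("eigen vermogen", 1), ⟨by simp, h⟩, rfl⟩ | exact ⟨("kapitaal", 1), ⟨by simp, h⟩, rfl⟩ | exact ⟨("bestemmingsreserve", 1), ⟨by simp, h⟩, rfl⟩ | exact ⟨("resultaat", 1), ⟨by simp, h⟩, rfl⟩ | exact ⟨("omzet", 2), ⟨by simp, h⟩, rfl⟩ | exact ⟨("opbrengst", 2), ⟨by simp, h⟩, rfl⟩ | exact ⟨("inkomsten", 2), ⟨by simp, h⟩, rfl⟩ | exact ⟨("contributie", 2), ⟨by simp, h⟩, rfl⟩ | exact ⟨("donatie", 2), ⟨by simp, h⟩, rfl⟩ | exact ⟨("kosten", 3), ⟨by simp, h⟩, rfl⟩ | exact ⟨("uitgaven", 3), ⟨by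 simp, h⟩, rfl⟩ | exact ⟨("inkoop", 3), ⟨by simp, h⟩, rfl⟩ | exact ⟨("afschrijving", 3), ⟨by simp, h⟩, rfl⟩ | exact ⟨("btw", 4), ⟨by simp, h⟩, rfl⟩ | exact ⟨("vaste activa", 5), ⟨by simp, h⟩, rfl⟩ | exact ⟨("inventaris", 5), ⟨by simp, h⟩, rfl⟩ | exact ⟨("gebouw", 5), ⟨by simp, h⟩, rfl⟩ | exact ⟨("machine", 5), ⟨by simp, h⟩, rfl⟩ | exact ⟨("voorraad", 6), ⟨by simp, h⟩, rfl⟩ | exact ⟨("vorderingen", 6), ⟨by simp, h⟩, rfl⟩ | exact ⟨("te ontvangen", 6), ⟨by simp, h⟩, rfl⟩ | exact ⟨("schuld", 7), ⟨by simp, h⟩, rfl⟩ | exact ⟨("te betalen", 7), ⟨by simp, h⟩, rfl⟩ | exact ⟨("lening", 7), ⟨by simp, h⟩, rfl⟩ | exact ⟨("vooruitontvangen", 7), ⟨by simp, h⟩, rfl⟩ | exact ⟨("reservering", 7), ⟨by simp, h⟩, rfl⟩)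

theorem pv_prefix_conj (ch : Char) (q : Int) :
    (pvPrefix.contains ch = true ∧ q = pvPrefix.getD ch 0) ↔
    ((q = 2 ∧ ch = '8') ∨ (q = 3 ∧ ch = '4') ∨ (q = 5 ∧ ch = '0') ∨ (q = 6 ∧ ch = '1') ∨ (q = 7 ∧ ch = '2')) := by
  by_cases h8 : ch = '8'
  · subst h8; rw [show pvPrefix.contains '8' = true from by decide, show pvPrefix.getD '8' 0 = 2 from by decide]; simp
  by_cases h4 : ch = '4'
  · subst h4; rw [show pvPrefix.contains '4' = true from by decide, show pvPrefix.getD '4' 0 = 3 from by decide]; simp [h8]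
  by_cases h0 : ch = '0'
  · subst h0; rw [show pvPrefix.contains '0' = true from by decide, show pvPrefix.getD '0' 0 = 5 from by decide]; simp [h8, h4]
  by_cases h1 : ch = '1'
  · subst h1; rw [show pvPrefix.contains '1' = true from by decide, show pvPrefix.getD '1' 0 = 6 from by decide]; simp [h8, h4, h0]
  by_cases h2 : ch = '2'
  · subst h2; rw [show pvPrefix.contains '2' = true from by decide, show pvPrefix.getD '2' 0 = 7 from by decide]; simp [h8, h4, h0, h1]
  · have hc : pvPrefix.contains ch = false := by
      rw [PySem.Dict.contains_eq_decide_mem_keys]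
      rw [show pvPrefix.keys = ['8', '4', '0', '1', '2'] from by decide]
      simp [h8, h4, h0, h1, h2]
    simp [hc, h8, h4, h0, h1, h2]

def pvC0 (d : String) : Bool := ["reservering vakantiegeld", "reservering sociale lasten"].any (fun t => PySem.Str.isIn t d)
def pvC1 (d : String) : Bool := ["eigen vermogen", "kapitaal", "bestemmingsreserve", "resultaat"].any (fun t => PySem.Str.isIn t d)
    || (PySem.Str.isIn "reserve" d && !(["vakantiegeld", "sociale lasten"].any (fun e => PySem.Str.isIn e d)))
def pvC2 (d : String) (o : Option Char) : Bool := ["omzet", "opbrengst", "inkomsten", "contributie", "donatie"].any (fun t => PySem.Str.isIn t d) || (o == some '8')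
def pvC3 (d : String) (o : Option Char) : Bool := ["kosten", "uitgaven", "inkoop", "afschrijving"].any (fun t => PySem.Str.isIn t d) || (o == some '4')
def pvC4 (d : String) : Bool := PySem.Str.isIn "btw" d
def pvC5 (d : String) (o : Option Char) : Bool := ["vaste activa", "inventaris", "gebouw", "machine"].any (fun t => PySem.Str.isIn t d) || (o == some '0')
def pvC6 (d : String) (o : Option Char) : Bool := !(PySem.Str.isIn "vooruitontvangen" d) &&
    (["voorraad", "vorderingen", "te ontvangen"].any (fun t => PySem.Str.isIn t d) || (o == some '1'))
def pvC7 (d : String) (o : Option Char) : Bool := ["schuld", "te betalen", "lening", "vooruitontvangen", "reservering"].any (fun t => PySem.Str.isIn t d) || (o == some '2')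

def pvHits (d : String) (o : Option Char) : PySem.Set Int :=
  let hits0 : PySem.Set Int :=
    PySem.Set.ofList ((pvKeywords.items.filter (fun tp => PySem.Str.isIn tp.1 d)).map (·.2))
  let hits1 : PySem.Set Int :=
    match o with
    | some ch => if pvPrefix.contains ch then hits0.add (pvPrefix.getD ch 0) else hits0
    | none => hits0
  let hits2 : PySem.Set Int :=
    if PySem.Str.isIn "reserve" d && !PySem.Str.isIn "vakantiegeld" d && !PySem.Str.isIn "sociale lasten" d
    then hits1.add 1 else hits1
  if PySem.Str.isIn "vooruitontvangen" d then hits2.discard 6 else hits2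

theorem pv_items : pvKeywords.items = pvKWList := by decide

theorem pv_mem_ite_add (b : Bool) (s : PySem.Set Int) (x q : Int) :
    (q ∈ (if b then PySem.Set.add s x else s)) ↔ (q ∈ s ∨ (b = true ∧ q = x)) := by
  cases b <;> simp [PySem.Set.mem_add]

theorem pv_mem_ite_discard (b : Bool) (s : PySem.Set Int) (x q : Int) :
    (q ∈ (if b then PySem.Set.discard s x else s)) ↔ (q ∈ s ∧ (b = true → q ≠ x)) := by
  cases b <;> simp [PySem.Set.mem_discard]

set_option maxHeartbeats 1000000 in
theorem pv_mem_hits (d : String) (o : Option Char) (p : Int) :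
    p ∈ pvHits d o ↔
    ((p = 0 ∧ pvC0 d = true) ∨ (p = 1 ∧ pvC1 d = true) ∨ (p = 2 ∧ pvC2 d o = true) ∨
     (p = 3 ∧ pvC3 d o = true) ∨ (p = 4 ∧ pvC4 d = true) ∨ (p = 5 ∧ pvC5 d o = true) ∨
     (p = 6 ∧ pvC6 d o = true) ∨ (p = 7 ∧ pvC7 d o = true)) := by
  unfold pvHits
  simp only [pv_items]
  have hkw := fun q => pv_mem_kw (fun t => PySem.Str.isIn t d) q
  cases o with
  | none =>
    simp only [pv_mem_ite_discard, pv_mem_ite_add, hkw]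
    simp only [pvC0, pvC1, pvC2, pvC3, pvC4, pvC5, pvC6, pvC7,
      List.any_cons, List.any_nil, Bool.or_false, Bool.or_eq_true, Bool.and_eq_true,
      Bool.not_eq_true', Bool.not_eq_true, Bool.or_eq_false_iff, beq_iff_eq, Option.some.injEq, reduceCtorEq, false_or, or_false, and_false, false_and]
    clear hkw
    generalize (PySem.Str.isIn "reservering vakantiegeld" d) = a0
    generalize (PySem.Str.isIn "reservering sociale lasten" d) = a1
    generalize (PySem.Str.isIn "eigen vermogen" d) = a2
    generalize (PySem.Str.isIn "kapitaal" d) = a3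
    generalize (PySem.Str.isIn "bestemmingsreserve" d) = a4
    generalize (PySem.Str.isIn "resultaat" d) = a5
    generalize (PySem.Str.isIn "omzet" d) = a6
    generalize (PySem.Str.isIn "opbrengst" d) = a7
    generalize (PySem.Str.isIn "inkomsten" d) = a8
    generalize (PySem.Str.isIn "contributie" d) = a9
    generalize (PySem.Str.isIn "donatie" d) = a10
    generalize (PySem.Str.isIn "kosten" d) = a11
    generalize (PySem.Str.isIn "uitgaven" d) = a12
    generalize (PySem.Str.isIn "inkoop" d) = a13
    generalize (PySem.Str.isIn "afschrijving" d) = a14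
    generalize (PySem.Str.isIn "btw" d) = a15
    generalize (PySem.Str.isIn "vaste activa" d) = a16
    generalize (PySem.Str.isIn "inventaris" d) = a17
    generalize (PySem.Str.isIn "gebouw" d) = a18
    generalize (PySem.Str.isIn "machine" d) = a19
    generalize (PySem.Str.isIn "voorraad" d) = a20
    generalize (PySem.Str.isIn "vorderingen" d) = a21
    generalize (PySem.Str.isIn "te ontvangen" d) = a22
    generalize (PySem.Str.isIn "schuld" d) = a23
    generalize (PySem.Str.isIn "te betalen" d) = a24
    generalize (PySem.Str.isIn "lening" d) = a25
    generalize (PySem.Str.isIn "vooruitontvangen" d) = a26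
    generalize (PySem.Str.isIn "reservering" d) = a27
    generalize (PySem.Str.isIn "reserve" d) = a28
    generalize (PySem.Str.isIn "vakantiegeld" d) = a29
    generalize (PySem.Str.isIn "sociale lasten" d) = a30
    by_cases hp0 : p = (0:Int); · subst hp0; simp only [Bool.not_eq_true, Int.reduceEq, ne_eq, not_false_iff, false_and, true_and, and_false, and_true, false_or, or_false, not_true, not_false_eq_true, iff_true, true_iff, imp_false]; tauto
    by_cases hp1 : p = (1:Int); · subst hp1; simp only [Bool.not_eq_true, Int.reduceEq, ne_eq, not_false_iff, false_and, true_and, and_false, and_true, false_or, or_false, not_true, not_false_eq_true, iff_true, true_iff, imp_false]; tauto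
    by_cases hp2 : p = (2:Int); · subst hp2; simp only [Bool.not_eq_true, Int.reduceEq, ne_eq, not_false_iff, false_and, true_and, and_false, and_true, false_or, or_false, not_true, not_false_eq_true, iff_true, true_iff, imp_false]; tauto
    by_cases hp3 : p = (3:Int); · subst hp3; simp only [Bool.not_eq_true, Int.reduceEq, ne_eq, not_false_iff, false_and, true_and, and_false, and_true, false_or, or_false, not_true, not_false_eq_true, iff_true, true_iff, imp_false]; tauto
    by_cases hp4 : p = (4:Int); · subst hp4; simp only [Bool.not_eq_true, Int.reduceEq, ne_eq, not_false_iff, false_and, true_and, and_false, and_true, false_or, or_false, not_true, not_false_eq_true, iff_true, true_iff, imp_false]; tauto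
    by_cases hp5 : p = (5:Int); · subst hp5; simp only [Bool.not_eq_true, Int.reduceEq, ne_eq, not_false_iff, false_and, true_and, and_false, and_true, false_or, or_false, not_true, not_false_eq_true, iff_true, true_iff, imp_false]; tauto
    by_cases hp6 : p = (6:Int); · subst hp6; simp only [Bool.not_eq_true, Int.reduceEq, ne_eq, not_false_iff, false_and, true_and, and_false, and_true, false_or, or_false, not_true, not_false_eq_true, iff_true, true_iff, imp_false]; tauto
    by_cases hp7 : p = (7:Int); · subst hp7; simp only [Bool.not_eq_true, Int.reduceEq, ne_eq, not_false_iff, false_and, true_and, and_false, and_true, false_or, or_false, not_true, not_false_eq_true, iff_true, true_iff, imp_false]; tauto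
    simp only [hp0, hp1, hp2, hp3, hp4, hp5, hp6, hp7, Bool.not_eq_true, Int.reduceEq, ne_eq, not_false_iff, false_and, true_and, and_false, and_true, false_or, or_false, not_true, not_false_eq_true, iff_true, true_iff, imp_false]
  | some ch =>
    simp only [pv_mem_ite_discard, pv_mem_ite_add, hkw]
    simp only [pv_prefix_conj]
    simp only [pvC0, pvC1, pvC2, pvC3, pvC4, pvC5, pvC6, pvC7,
      List.any_cons, List.any_nil, Bool.or_false, Bool.or_eq_true, Bool.and_eq_true,
      Bool.not_eq_true', Bool.not_eq_true, Bool.or_eq_false_iff, beq_iff_eq, Option.some.injEq, reduceCtorEq, false_or, or_false, and_false, false_and]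
    clear hkw
    generalize (PySem.Str.isIn "reservering vakantiegeld" d) = a0
    generalize (PySem.Str.isIn "reservering sociale lasten" d) = a1
    generalize (PySem.Str.isIn "eigen vermogen" d) = a2
    generalize (PySem.Str.isIn "kapitaal" d) = a3
    generalize (PySem.Str.isIn "bestemmingsreserve" d) = a4
    generalize (PySem.Str.isIn "resultaat" d) = a5
    generalize (PySem.Str.isIn "omzet" d) = a6
    generalize (PySem.Str.isIn "opbrengst" d) = a7
    generalize (PySem.Str.isIn "inkomsten" d) = a8
    generalize (PySem.Str.isIn "contributie" d) = a9
    generalize (PySem.Str.isIn "donatie" d) = a10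
    generalize (PySem.Str.isIn "kosten" d) = a11
    generalize (PySem.Str.isIn "uitgaven" d) = a12
    generalize (PySem.Str.isIn "inkoop" d) = a13
    generalize (PySem.Str.isIn "afschrijving" d) = a14
    generalize (PySem.Str.isIn "btw" d) = a15
    generalize (PySem.Str.isIn "vaste activa" d) = a16
    generalize (PySem.Str.isIn "inventaris" d) = a17
    generalize (PySem.Str.isIn "gebouw" d) = a18
    generalize (PySem.Str.isIn "machine" d) = a19
    generalize (PySem.Str.isIn "voorraad" d) = a20
    generalize (PySem.Str.isIn "vorderingen" d) = a21
    generalize (PySem.Str.isIn "te ontvangen" d) = a22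
    generalize (PySem.Str.isIn "schuld" d) = a23
    generalize (PySem.Str.isIn "te betalen" d) = a24
    generalize (PySem.Str.isIn "lening" d) = a25
    generalize (PySem.Str.isIn "vooruitontvangen" d) = a26
    generalize (PySem.Str.isIn "reservering" d) = a27
    generalize (PySem.Str.isIn "reserve" d) = a28
    generalize (PySem.Str.isIn "vakantiegeld" d) = a29
    generalize (PySem.Str.isIn "sociale lasten" d) = a30
    by_cases hp0 : p = (0:Int); · subst hp0; simp only [Bool.not_eq_true, Int.reduceEq, ne_eq, not_false_iff, false_and, true_and, and_false, and_true, false_or, or_false, not_true, not_false_eq_true, iff_true, true_iff, imp_false]; tauto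
    by_cases hp1 : p = (1:Int); · subst hp1; simp only [Bool.not_eq_true, Int.reduceEq, ne_eq, not_false_iff, false_and, true_and, and_false, and_true, false_or, or_false, not_true, not_false_eq_true, iff_true, true_iff, imp_false]; tauto
    by_cases hp2 : p = (2:Int); · subst hp2; simp only [Bool.not_eq_true, Int.reduceEq, ne_eq, not_false_iff, false_and, true_and, and_false, and_true, false_or, or_false, not_true, not_false_eq_true, iff_true, true_iff, imp_false]; tauto
    by_cases hp3 : p = (3:Int); · subst hp3; simp only [Bool.not_eq_true, Int.reduceEq, ne_eq, not_false_iff, false_and, true_and, and_false, and_true, false_or, or_false, not_true, not_false_eq_true, iff_true, true_iff, imp_false]; tauto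
    by_cases hp4 : p = (4:Int); · subst hp4; simp only [Bool.not_eq_true, Int.reduceEq, ne_eq, not_false_iff, false_and, true_and, and_false, and_true, false_or, or_false, not_true, not_false_eq_true, iff_true, true_iff, imp_false]; tauto
    by_cases hp5 : p = (5:Int); · subst hp5; simp only [Bool.not_eq_true, Int.reduceEq, ne_eq, not_false_iff, false_and, true_and, and_false, and_true, false_or, or_false, not_true, not_false_eq_true, iff_true, true_iff, imp_false]; tauto
    by_cases hp6 : p = (6:Int); · subst hp6; simp only [Bool.not_eq_true, Int.reduceEq, ne_eq, not_false_iff, false_and, true_and, and_false, and_true, false_or, or_false, not_true, not_false_eq_true, iff_true, true_iff, imp_false]; tauto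
    by_cases hp7 : p = (7:Int); · subst hp7; simp only [Bool.not_eq_true, Int.reduceEq, ne_eq, not_false_iff, false_and, true_and, and_false, and_true, false_or, or_false, not_true, not_false_eq_true, iff_true, true_iff, imp_false]; tauto
    simp only [hp0, hp1, hp2, hp3, hp4, hp5, hp6, hp7, Bool.not_eq_true, Int.reduceEq, ne_eq, not_false_iff, false_and, true_and, and_false, and_true, false_or, or_false, not_true, not_false_eq_true, iff_true, true_iff, imp_false]

theorem pv_startswith_char (c : String) (ch : Char) (p : String) (hp : p.toList = [ch]) :
    PySem.Str.startswith c p = true ↔ PySem.Str.pyGet? c 0 = some ch := by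
  have h1 : PySem.Str.startswith c p = PySem.Chars.startswith c.toList p.toList := by
    simp [PySem.Str.startswith_eq]
  rw [h1, hp, PySem.Chars.startswith_iff]
  have h2 : PySem.Str.pyGet? c 0 = PySem.List.pyGet? c.toList 0 := by
    simp [PySem.Str.pyGet?]
  rw [h2]
  cases c.toList with
  | nil => simp [PySem.List.pyGet?]
  | cons x xs =>
    rw [PySem.List.pyGet?_zero_cons]
    constructor
    · intro h; obtain ⟨t, ht⟩ := h; simp at ht; simp [ht.1]
    · intro h; simp at h; subst h; exact ⟨xs, rfl⟩

theorem pv_pyGet0_none (c : String) : PySem.Str.pyGet? c 0 = none ↔ c = "" := by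
  have h2 : PySem.Str.pyGet? c 0 = PySem.List.pyGet? c.toList 0 := by
    simp [PySem.Str.pyGet?]
  rw [h2]
  cases hc : c.toList with
  | nil => simp [PySem.List.pyGet?]
           exact String.ext (by simpa using hc)
  | cons x xs => rw [PySem.List.pyGet?_zero_cons]; constructor
                 · intro h; cases h
                 · intro h; subst h; simp at hc

set_option maxHeartbeats 2000000 in
theorem pv_default_lookup (fd : Char) :
    (if fd = '0' || fd = '1' then "Current Asset"
     else if fd = '2' then "Current Liability"
     else if fd = '4' || fd = '5' || fd = '6' || fd = '7' then "Expense Account"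
     else if fd = '8' then "Income Account"
     else "Unknown")
    = pvDefault.getD fd "Unknown" := by
  by_cases h0 : fd = '0'; · subst h0; decide
  by_cases h1 : fd = '1'; · subst h1; decide
  by_cases h2 : fd = '2'; · subst h2; decide
  by_cases h4 : fd = '4'; · subst h4; decide
  by_cases h5 : fd = '5'; · subst h5; decide
  by_cases h6 : fd = '6'; · subst h6; decide
  by_cases h7 : fd = '7'; · subst h7; decide
  by_cases h8 : fd = '8'; · subst h8; decide
  have hmk : pvDefault = PySem.Dict.mk [('0', "Current Asset"), ('1', "Current Asset"), ('2', "Current Liability"),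
      ('4', "Expense Account"), ('5', "Expense Account"), ('6', "Expense Account"),
      ('7', "Expense Account"), ('8', "Income Account")] := by decide
  rw [hmk]
  simp [PySem.Dict.getD_eq_get?_getD, PySem.Dict.get?, h0, h1, h2, h4, h5, h6, h7, h8,
    Ne.symm h0, Ne.symm h1, Ne.symm h2, Ne.symm h4, Ne.symm h5, Ne.symm h6, Ne.symm h7, Ne.symm h8]

theorem pv_min_id_some {s : List Int} {m : Int} (h1 : m ∈ s) (h2 : ∀ x ∈ s, m ≤ x) :
    PySem.List.min? s (fun x => x) = some m := by
  cases hm : PySem.List.min? s (fun x => x) with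
  | none =>
    rw [PySem.List.min?_eq_none_iff] at hm
    subst hm; cases h1
  | some mm =>
    have hmem := PySem.List.min?_mem hm
    have hle := PySem.List.min?_isMin hm m h1
    have hge := h2 mm hmem
    simp only [Option.some.injEq]
    omega

theorem pv_sw (c : String) (p : String) (ch : Char) (hp : p.toList = [ch]) :
    PySem.Str.startswith c p = (PySem.Str.pyGet? c 0 == some ch) := by
  rw [Bool.eq_iff_iff, beq_iff_eq]
  exact pv_startswith_char c ch p hp

set_option maxHeartbeats 1000000 in
theorem pv_core (d : String) (o : Option Char) (g : PySem.Dict String (List (List (String × String)))) (a : List (String × String)) :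
    (if pvC0 d then g.modify "Current Liability" [] (· ++ [a])
     else if pvC1 d then g.modify "Equity" [] (· ++ [a])
     else if pvC2 d o then g.modify "Income Account" [] (· ++ [a])
     else if pvC3 d o then g.modify "Expense Account" [] (· ++ [a])
     else if pvC4 d then g.modify "Tax" [] (· ++ [a])
     else if pvC5 d o then g.modify "Fixed Asset" [] (· ++ [a])
     else if pvC6 d o then g.modify "Current Asset" [] (· ++ [a])
     else if pvC7 d o then g.modify "Current Liability" [] (· ++ [a])
     else match o with
          | none => g
          | some fd =>
            if fd = '0' || fd = '1' then g.modify "Current Asset" [] (· ++ [a])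
            else if fd = '2' then g.modify "Current Liability" [] (· ++ [a])
            else if fd = '4' || fd = '5' || fd = '6' || fd = '7' then g.modify "Expense Account" [] (· ++ [a])
            else if fd = '8' then g.modify "Income Account" [] (· ++ [a])
            else g.modify "Unknown" [] (· ++ [a]))
    = (match PySem.List.min? (pvHits d o) (fun x => x) with
       | some m =>
         match PySem.List.pyGet? pvLabels m with
         | some label => g.modify label [] (· ++ [a])
         | none => g
       | none =>
         match o with
         | some ch => g.modify (pvDefault.getD ch "Unknown") [] (· ++ [a])
         | none => g) := by
  by_cases h0 : pvC0 d = true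
  · rw [if_pos h0]
    have hm : PySem.List.min? (pvHits d o) (fun x => x) = some 0 :=
      pv_min_id_some ((pv_mem_hits d o 0).mpr (Or.inl ⟨rfl, h0⟩))
        (by intro x hx
            rcases (pv_mem_hits d o x).mp hx with ⟨he,hc⟩|⟨he,hc⟩|⟨he,hc⟩|⟨he,hc⟩|⟨he,hc⟩|⟨he,hc⟩|⟨he,hc⟩|⟨he,hc⟩ <;>
              first | omega)
    rw [hm]; rfl
  by_cases h1 : pvC1 d = true
  · rw [if_neg h0]
    rw [if_pos h1]
    have hm : PySem.List.min? (pvHits d o) (fun x => x) = some 1 :=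
      pv_min_id_some ((pv_mem_hits d o 1).mpr (Or.inr (Or.inl ⟨rfl, h1⟩)))
        (by intro x hx
            rcases (pv_mem_hits d o x).mp hx with ⟨he,hc⟩|⟨he,hc⟩|⟨he,hc⟩|⟨he,hc⟩|⟨he,hc⟩|⟨he,hc⟩|⟨he,hc⟩|⟨he,hc⟩ <;>
              first | omega | exact absurd hc h0)
    rw [hm]; rfl
  by_cases h2 : pvC2 d o = true
  · rw [if_neg h0, if_neg h1]
    rw [if_pos h2]
    have hm : PySem.List.min? (pvHits d o) (fun x => x) = some 2 :=
      pv_min_id_some ((pv_mem_hits d o 2).mpr (Or.inr (Or.inr (Or.inl ⟨rfl, h2⟩))))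
        (by intro x hx
            rcases (pv_mem_hits d o x).mp hx with ⟨he,hc⟩|⟨he,hc⟩|⟨he,hc⟩|⟨he,hc⟩|⟨he,hc⟩|⟨he,hc⟩|⟨he,hc⟩|⟨he,hc⟩ <;>
              first | omega | exact absurd hc h0 | exact absurd hc h1)
    rw [hm]; rfl
  by_cases h3 : pvC3 d o = true
  · rw [if_neg h0, if_neg h1, if_neg h2]
    rw [if_pos h3]
    have hm : PySem.List.min? (pvHits d o) (fun x => x) = some 3 :=
      pv_min_id_some ((pv_mem_hits d o 3).mpr (Or.inr (Or.inr (Or.inr (Or.inl ⟨rfl, h3⟩)))))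
        (by intro x hx
            rcases (pv_mem_hits d o x).mp hx with ⟨he,hc⟩|⟨he,hc⟩|⟨he,hc⟩|⟨he,hc⟩|⟨he,hc⟩|⟨he,hc⟩|⟨he,hc⟩|⟨he,hc⟩ <;>
              first | omega | exact absurd hc h0 | exact absurd hc h1 | exact absurd hc h2)
    rw [hm]; rfl
  by_cases h4 : pvC4 d = true
  · rw [if_neg h0, if_neg h1, if_neg h2, if_neg h3]
    rw [if_pos h4]
    have hm : PySem.List.min? (pvHits d o) (fun x => x) = some 4 :=
      pv_min_id_some ((pv_mem_hits d o 4).mpr (Or.inr (Or.inr (Or.inr (Or.inr (Or.inl ⟨rfl, h4⟩))))))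
        (by intro x hx
            rcases (pv_mem_hits d o x).mp hx with ⟨he,hc⟩|⟨he,hc⟩|⟨he,hc⟩|⟨he,hc⟩|⟨he,hc⟩|⟨he,hc⟩|⟨he,hc⟩|⟨he,hc⟩ <;>
              first | omega | exact absurd hc h0 | exact absurd hc h1 | exact absurd hc h2 | exact absurd hc h3)
    rw [hm]; rfl
  by_cases h5 : pvC5 d o = true
  · rw [if_neg h0, if_neg h1, if_neg h2, if_neg h3, if_neg h4]
    rw [if_pos h5]
    have hm : PySem.List.min? (pvHits d o) (fun x => x) = some 5 :=
      pv_min_id_some ((pv_mem_hits d o 5).mpr (Or.inr (Or.inr (Or.inr (Or.inr (Or.inr (Or.inl ⟨rfl, h5⟩)))))))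
        (by intro x hx
            rcases (pv_mem_hits d o x).mp hx with ⟨he,hc⟩|⟨he,hc⟩|⟨he,hc⟩|⟨he,hc⟩|⟨he,hc⟩|⟨he,hc⟩|⟨he,hc⟩|⟨he,hc⟩ <;>
              first | omega | exact absurd hc h0 | exact absurd hc h1 | exact absurd hc h2 | exact absurd hc h3 | exact absurd hc h4)
    rw [hm]; rfl
  by_cases h6 : pvC6 d o = true
  · rw [if_neg h0, if_neg h1, if_neg h2, if_neg h3, if_neg h4, if_neg h5]
    rw [if_pos h6]
    have hm : PySem.List.min? (pvHits d o) (fun x => x) = some 6 :=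
      pv_min_id_some ((pv_mem_hits d o 6).mpr (Or.inr (Or.inr (Or.inr (Or.inr (Or.inr (Or.inr (Or.inl ⟨rfl, h6⟩))))))))
        (by intro x hx
            rcases (pv_mem_hits d o x).mp hx with ⟨he,hc⟩|⟨he,hc⟩|⟨he,hc⟩|⟨he,hc⟩|⟨he,hc⟩|⟨he,hc⟩|⟨he,hc⟩|⟨he,hc⟩ <;>
              first | omega | exact absurd hc h0 | exact absurd hc h1 | exact absurd hc h2 | exact absurd hc h3 | exact absurd hc h4 | exact absurd hc h5)
    rw [hm]; rfl
  by_cases h7 : pvC7 d o = true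
  · rw [if_neg h0, if_neg h1, if_neg h2, if_neg h3, if_neg h4, if_neg h5, if_neg h6]
    rw [if_pos h7]
    have hm : PySem.List.min? (pvHits d o) (fun x => x) = some 7 :=
      pv_min_id_some ((pv_mem_hits d o 7).mpr (Or.inr (Or.inr (Or.inr (Or.inr (Or.inr (Or.inr (Or.inr (⟨rfl, h7⟩)))))))))
        (by intro x hx
            rcases (pv_mem_hits d o x).mp hx with ⟨he,hc⟩|⟨he,hc⟩|⟨he,hc⟩|⟨he,hc⟩|⟨he,hc⟩|⟨he,hc⟩|⟨he,hc⟩|⟨he,hc⟩ <;>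
              first | omega | exact absurd hc h0 | exact absurd hc h1 | exact absurd hc h2 | exact absurd hc h3 | exact absurd hc h4 | exact absurd hc h5 | exact absurd hc h6)
    rw [hm]; rfl
  · rw [if_neg h0, if_neg h1, if_neg h2, if_neg h3, if_neg h4, if_neg h5, if_neg h6, if_neg h7]
    have hempty : pvHits d o = [] := by
      rw [List.eq_nil_iff_forall_not_mem]
      intro x hx
      rcases (pv_mem_hits d o x).mp hx with ⟨he,hc⟩|⟨he,hc⟩|⟨he,hc⟩|⟨he,hc⟩|⟨he,hc⟩|⟨he,hc⟩|⟨he,hc⟩|⟨he,hc⟩ <;>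
        first | exact h0 hc | exact h1 hc | exact h2 hc | exact h3 hc | exact h4 hc | exact h5 hc | exact h6 hc | exact h7 hc
    rw [show PySem.List.min? (pvHits d o) (fun x => x) = none from (PySem.List.min?_eq_none_iff _ _).mpr hempty]
    cases o with
    | none => rfl
    | some fd =>
      show (if fd = '0' || fd = '1' then g.modify "Current Asset" [] (· ++ [a])
            else if fd = '2' then g.modify "Current Liability" [] (· ++ [a])
            else if fd = '4' || fd = '5' || fd = '6' || fd = '7' then g.modify "Expense Account" [] (· ++ [a])
            else if fd = '8' then g.modify "Income Account" [] (· ++ [a])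
            else g.modify "Unknown" [] (· ++ [a]))
          = g.modify (pvDefault.getD fd "Unknown") [] (· ++ [a])
      rw [← pv_default_lookup fd]
      split_ifs <;> rfl

set_option maxHeartbeats 2000000 in
theorem pv_step (d c : String) (g : PySem.Dict String (List (List (String × String)))) (a : List (String × String)) :
    (if ["reservering vakantiegeld", "reservering sociale lasten"].any (fun t => PySem.Str.isIn t d) then
      g.modify "Current Liability" [] (· ++ [a])
    else if ["eigen vermogen", "kapitaal", "bestemmingsreserve", "resultaat"].any (fun t => PySem.Str.isIn t d)
        || (PySem.Str.isIn "reserve" d && !(["vakantiegeld", "sociale lasten"].any (fun e => PySem.Str.isIn e d))) then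
      g.modify "Equity" [] (· ++ [a])
    else if ["omzet", "opbrengst", "inkomsten", "contributie", "donatie"].any (fun t => PySem.Str.isIn t d) || PySem.Str.startswith c "8" then
      g.modify "Income Account" [] (· ++ [a])
    else if ["kosten", "uitgaven", "inkoop", "afschrijving"].any (fun t => PySem.Str.isIn t d) || PySem.Str.startswith c "4" then
      g.modify "Expense Account" [] (· ++ [a])
    else if PySem.Str.isIn "btw" d then
      g.modify "Tax" [] (· ++ [a])
    else if ["vaste activa", "inventaris", "gebouw", "machine"].any (fun t => PySem.Str.isIn t d) || PySem.Str.startswith c "0" then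
      g.modify "Fixed Asset" [] (· ++ [a])
    else if !(PySem.Str.isIn "vooruitontvangen" d) &&
        (["voorraad", "vorderingen", "te ontvangen"].any (fun t => PySem.Str.isIn t d) || PySem.Str.startswith c "1") then
      g.modify "Current Asset" [] (· ++ [a])
    else if ["schuld", "te betalen", "lening", "vooruitontvangen", "reservering"].any (fun t => PySem.Str.isIn t d) || PySem.Str.startswith c "2" then
      g.modify "Current Liability" [] (· ++ [a])
    else
      if c = "" then g
      else
        match PySem.Str.pyGet? c 0 with
        | none => g
        | some first_digit =>
          if first_digit = '0' || first_digit = '1' then g.modify "Current Asset" [] (· ++ [a])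
          else if first_digit = '2' then g.modify "Current Liability" [] (· ++ [a])
          else if first_digit = '4' || first_digit = '5' || first_digit = '6' || first_digit = '7' then g.modify "Expense Account" [] (· ++ [a])
          else if first_digit = '8' then g.modify "Income Account" [] (· ++ [a])
          else g.modify "Unknown" [] (· ++ [a]))
    = (let hits0 : PySem.Set Int :=
        PySem.Set.ofList ((pvKeywords.items.filter (fun tp => PySem.Str.isIn tp.1 d)).map (·.2))
      let hits1 : PySem.Set Int :=
        match PySem.Str.pyGet? c 0 with
        | some ch => if pvPrefix.contains ch then hits0.add (pvPrefix.getD ch 0) else hits0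
        | none => hits0
      let hits2 : PySem.Set Int :=
        if PySem.Str.isIn "reserve" d && !PySem.Str.isIn "vakantiegeld" d && !PySem.Str.isIn "sociale lasten" d
        then hits1.add 1 else hits1
      let hits3 : PySem.Set Int :=
        if PySem.Str.isIn "vooruitontvangen" d then hits2.discard 6 else hits2
      match PySem.List.min? hits3 (fun x => x) with
      | some m =>
        match PySem.List.pyGet? pvLabels m with
        | some label => g.modify label [] (· ++ [a])
        | none => g
      | none =>
        match PySem.Str.pyGet? c 0 with
        | some ch => g.modify (pvDefault.getD ch "Unknown") [] (· ++ [a])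
        | none => g) := by
  simp only [pv_sw c "8" '8' (by decide), pv_sw c "4" '4' (by decide), pv_sw c "0" '0' (by decide),
    pv_sw c "1" '1' (by decide), pv_sw c "2" '2' (by decide)]
  cases ho : PySem.Str.pyGet? c 0 with
  | none =>
    have hc : c = "" := (pv_pyGet0_none c).mp ho
    rw [if_pos hc]
    exact pv_core d none g a
  | some ch =>
    have hc : ¬(c = "") := by
      intro h; rw [h, show PySem.Str.pyGet? "" 0 = none from by decide] at ho; cases ho
    rw [if_neg hc]
    exact pv_core d (some ch) g a

set_option maxHeartbeats 2000000 in
theorem pv_fold (accounts : List (List (String × String))) :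
    group_accounts_by_type accounts = group_accounts_by_type_alt accounts := by
  unfold group_accounts_by_type group_accounts_by_type_alt
  congr 1
  congr 1
  funext g a
  exact pv_step (PySem.Str.lower ((PySem.Dict.mk a).getD "description" ""))
    ((PySem.Dict.mk a).getD "code" "") g a

-- ===== VERDICT (by name: the statement is the Claim_ definition above) =====
theorem group_accounts_by_type_spec : Claim_equal_group_accounts_by_type := by
  intro accounts _
  unfold Spec_group_accounts_by_type
  exact pv_fold accounts
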